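-- pv_equiv track=rewrite | github.com/IntelLabs/aspect-extraction | src/absa_utils.py | extract_gold_phrases
-- ===== SOURCE A (Python) =====
-- def extract_gold_phrases(asp_labels):
--     indices, cur_idx = set(), None
--
--     for i, asp_label in enumerate(asp_labels + ['END']):
--         if asp_label != "I-ASP" and cur_idx is not None:
--             indices.add((cur_idx, i - 1))
--             cur_idx = None
--         if asp_label == "B-ASP":
--             cur_idx = i
--
--     return indices
-- ===== SOURCE B (Python) =====
-- def extract_gold_phrases(asp_labels):
--     n = len(asp_labels)
--     anchors = [j for j in range(n) if asp_labels[j] == "B-ASP"]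
--     spans = set()
--     for j in anchors:
--         end = j
--         while end + 1 < n and asp_labels[end + 1] == "I-ASP":
--             end += 1
--         spans.add((j, end))
--     return spans
-- ===== Notes on version B (the rewrite author's own statement) =====
-- stated objective: alternative
-- what changed: Replaces A's single pass with sentinel and running open-span state by a two-phase anchor-then-expand traversal: first collect the indices of 'B-ASP' anchors, then for each anchor extend right over consecutive 'I-ASP' labels to find the span end.
import Mathlib
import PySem

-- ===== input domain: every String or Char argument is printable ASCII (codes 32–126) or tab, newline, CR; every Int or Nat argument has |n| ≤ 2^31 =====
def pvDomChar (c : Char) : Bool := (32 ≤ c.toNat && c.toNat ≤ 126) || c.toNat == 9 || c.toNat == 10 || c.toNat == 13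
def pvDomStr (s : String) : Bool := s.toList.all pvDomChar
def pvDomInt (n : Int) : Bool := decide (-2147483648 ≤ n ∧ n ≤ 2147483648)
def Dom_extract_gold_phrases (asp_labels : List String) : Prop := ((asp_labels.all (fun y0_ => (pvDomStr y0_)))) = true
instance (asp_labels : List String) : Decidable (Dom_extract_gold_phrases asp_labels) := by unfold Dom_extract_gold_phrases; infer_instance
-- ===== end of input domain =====

-- B replaces A's single sentinel-based pass with a two-phase anchor-then-expand traversal (alternative decomposition, same cost).


-- ===== PORT A =====
-- A's loop body: close the open span on a non-'I-ASP' label, then open on 'B-ASP'.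
def pvStepA (st : PySem.Set (Int × Int) × Option Int) (p : Int × String) :
    PySem.Set (Int × Int) × Option Int :=
  let st1 :=
    match st.2 with
    | some c => if p.2 ≠ "I-ASP" then (PySem.Set.add st.1 (c, p.1 - 1), (none : Option Int)) else st
    | none => st
  if p.2 = "B-ASP" then (st1.1, some p.1) else st1

def extract_gold_phrases (asp_labels : List String) : List (Int × Int) :=
  ((PySem.List.enumerate (asp_labels ++ ["END"])).foldl pvStepA
    ((PySem.Set.empty : PySem.Set (Int × Int)), (none : Option Int))).1

-- ===== PORT B =====
-- B's while loop: extend end while the next label is 'I-ASP'.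
def pvExpand (labels : List String) (e : Nat) : Nat :=
  if h : e + 1 < labels.length then
    if labels[e + 1] = "I-ASP" then pvExpand labels (e + 1) else e
  else e
termination_by labels.length - e

def extract_gold_phrases_alt (asp_labels : List String) : List (Int × Int) :=
  let anchors := (List.range asp_labels.length).filter
    (fun j => asp_labels.getD j "" == "B-ASP")
  anchors.foldl
    (fun (s : PySem.Set (Int × Int)) (j : Nat) =>
      PySem.Set.add s (((j : Int)), ((pvExpand asp_labels j : Int))))
    (PySem.Set.empty : PySem.Set (Int × Int))

-- ===== PRECONDITION & SPEC =====
def Spec_extract_gold_phrases (asp_labels : List String) (out : List (Int × Int)) : Prop := out = extract_gold_phrases_alt asp_labels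
instance (asp_labels : List String) (out : List (Int × Int)) : Decidable (Spec_extract_gold_phrases asp_labels out) := by unfold Spec_extract_gold_phrases; infer_instance

-- ===== CLAIM (what is proved, stated in full; the proofs are below) =====
def Claim_equal_extract_gold_phrases : Prop := ∀ (asp_labels : List String), Dom_extract_gold_phrases asp_labels → Spec_extract_gold_phrases asp_labels (extract_gold_phrases asp_labels)

-- ===== LEMMAS AND PROOFS =====

-- number of leading 'I-ASP' labels
def leadI (rest : List String) : Nat := (rest.takeWhile (fun l => l == "I-ASP")).length

-- cast the open-span state to the Int state A's fold carries
def pvCastCur : Option Nat → Option Int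
  | some j => some ((j : Int))
  | none => none

-- common normal form: the spans emitted when scanning `rest` from index `i` with open span `cur`
def gSpans : Nat → Option Nat → List String → List (Int × Int)
  | i, some j, [] => [((j : Int), (i : Int) - 1)]
  | _, none, [] => []
  | i, cur, l :: rest =>
    if l = "I-ASP" then gSpans (i + 1) cur rest
    else
      match cur with
      | some j => ((j : Int), (i : Int) - 1) ::
          (if l = "B-ASP" then gSpans (i + 1) (some i) rest else gSpans (i + 1) none rest)
      | none => if l = "B-ASP" then gSpans (i + 1) (some i) rest else gSpans (i + 1) none rest

theorem lemA : ∀ (rest : List String) (i : Nat) (cur : Option Nat) (acc : List (Int × Int)),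
    (∀ j, cur = some j → j < i) →
    (∀ p ∈ acc, p.1 < (match cur with | some j => ((j : Int)) | none => ((i : Int)))) →
    ((PySem.List.enumerate (rest ++ ["END"]) (i : Int)).foldl pvStepA
       (acc, pvCastCur cur)).1 = acc ++ gSpans i cur rest := by
  intro rest
  induction rest with
  | nil =>
    intro i cur acc hcur hacc
    cases cur with
    | none => simp [PySem.List.enumerate, pvStepA, pvCastCur, gSpans]
    | some j =>
      have hne : ((j : Int), (i : Int) - 1) ∉ acc := by
        intro hmem
        have := hacc _ hmem
        simp at this
      simp [PySem.List.enumerate, pvStepA, pvCastCur, gSpans, PySem.Set.add_of_not_mem hne]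
  | cons l rest ih =>
    intro i cur acc hcur hacc
    rw [List.cons_append, PySem.List.enumerate_cons, List.foldl_cons]
    have hcast : ((i : Int) + 1) = (((i + 1 : Nat)) : Int) := by push_cast; ring
    cases cur with
    | none =>
      simp only [pvCastCur]
      by_cases hI : l = "I-ASP"
      · subst hI
        have hstep : pvStepA (acc, (none : Option Int)) ((i : Int), "I-ASP")
            = (acc, (none : Option Int)) := by simp [pvStepA]
        rw [hstep, hcast]
        have := ih (i + 1) none acc (by simp)
          (by intro p hp; have := hacc p hp; simp_all; omega)
        simp only [pvCastCur] at this
        rw [this]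
        simp [gSpans]
      · by_cases hB : l = "B-ASP"
        · subst hB
          have hstep : pvStepA (acc, (none : Option Int)) ((i : Int), "B-ASP")
              = (acc, some ((i : Int))) := by simp [pvStepA]
          rw [hstep, hcast]
          have := ih (i + 1) (some i) acc (by intro j hj; cases hj; omega)
            (by intro p hp; have := hacc p hp; simpa using this)
          simp only [pvCastCur] at this
          rw [this]
          simp [gSpans]
        · have hstep : pvStepA (acc, (none : Option Int)) ((i : Int), l)
              = (acc, (none : Option Int)) := by simp [pvStepA, hB]
          rw [hstep, hcast]
          have := ih (i + 1) none acc (by simp)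
            (by intro p hp; have := hacc p hp; simp_all; omega)
          simp only [pvCastCur] at this
          rw [this]
          simp [gSpans, hI, hB]
    | some j =>
      simp only [pvCastCur]
      have hji : j < i := hcur j rfl
      have hne : ((j : Int), (i : Int) - 1) ∉ acc := by
        intro hmem; have := hacc _ hmem; simp at this
      have haccj : ∀ p ∈ acc ++ [((j : Int), (i : Int) - 1)], p.1 < ((i : Int)) := by
        intro p hp
        rcases List.mem_append.1 hp with h | h
        · have := hacc p h; simp at this; omega
        · simp only [List.mem_singleton] at h
          subst h
          simpa using (show ((j : Int)) < ((i : Int)) from by exact_mod_cast hji)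
      by_cases hI : l = "I-ASP"
      · subst hI
        have hstep : pvStepA (acc, some ((j : Int))) ((i : Int), "I-ASP")
            = (acc, some ((j : Int))) := by simp [pvStepA]
        rw [hstep, hcast]
        have := ih (i + 1) (some j) acc (by intro j' hj'; cases hj'; omega)
          (by intro p hp; have := hacc p hp; simpa using this)
        simp only [pvCastCur] at this
        rw [this]
        simp [gSpans]
      · by_cases hB : l = "B-ASP"
        · subst hB
          have hstep : pvStepA (acc, some ((j : Int))) ((i : Int), "B-ASP")
              = (acc ++ [((j : Int), (i : Int) - 1)], some ((i : Int))) := by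
            simp [pvStepA, PySem.Set.add_of_not_mem hne]
          rw [hstep, hcast]
          have := ih (i + 1) (some i) (acc ++ [((j : Int), (i : Int) - 1)])
            (by intro j' hj'; cases hj'; omega)
            (by intro p hp; have := haccj p hp; simpa using this)
          simp only [pvCastCur] at this
          rw [this]
          simp [gSpans]
        · have hstep : pvStepA (acc, some ((j : Int))) ((i : Int), l)
              = (acc ++ [((j : Int), (i : Int) - 1)], (none : Option Int)) := by
            simp [pvStepA, hI, hB, PySem.Set.add_of_not_mem hne]
          rw [hstep, hcast]
          have := ih (i + 1) none (acc ++ [((j : Int), (i : Int) - 1)]) (by simp)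
            (by intro p hp; have := haccj p hp; simp_all; omega)
          simp only [pvCastCur] at this
          rw [this]
          simp [gSpans, hI, hB]

theorem A_eq_gSpans (labels : List String) :
    extract_gold_phrases labels = gSpans 0 none labels := by
  have := lemA labels 0 none [] (by simp) (by simp)
  simpa [extract_gold_phrases, PySem.Set.empty] using this

theorem expand_eq_aux (full : List String) : ∀ (m e : Nat), full.length - e ≤ m →
    pvExpand full e = e + leadI (full.drop (e + 1)) := by
  intro m
  induction m with
  | zero =>
    intro e he
    rw [pvExpand]
    have h : ¬ (e + 1 < full.length) := by omega
    rw [dif_neg h]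
    have hd : full.drop (e + 1) = [] := List.drop_eq_nil_of_le (by omega)
    simp [hd, leadI]
  | succ m ih =>
    intro e he
    rw [pvExpand]
    by_cases h : e + 1 < full.length
    · have hd : full.drop (e + 1) = full[e + 1] :: full.drop (e + 1 + 1) :=
        List.drop_eq_getElem_cons h
      by_cases hI : full[e + 1] = "I-ASP"
      · rw [dif_pos h, if_pos hI, ih (e + 1) (by omega), hd]
        simp [leadI, hI]
        omega
      · rw [dif_pos h, if_neg hI, hd]
        simp [leadI, hI]
    · rw [dif_neg h]
      have hd : full.drop (e + 1) = [] := List.drop_eq_nil_of_le (by omega)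
      simp [hd, leadI]

theorem expand_eq (full : List String) (e : Nat) :
    pvExpand full e = e + leadI (full.drop (e + 1)) :=
  expand_eq_aux full (full.length - e) e le_rfl

theorem gSpans_some (rest : List String) : ∀ (i j : Nat),
    gSpans i (some j) rest =
      ((j : Int), (i : Int) - 1 + (leadI rest : Int)) ::
        gSpans (i + leadI rest) none (rest.drop (leadI rest)) := by
  induction rest with
  | nil => intro i j; simp [gSpans, leadI]
  | cons l rest ih =>
    intro i j
    by_cases hI : l = "I-ASP"
    · subst hI
      have h1 : leadI ("I-ASP" :: rest) = leadI rest + 1 := by simp [leadI]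
      rw [show gSpans i (some j) ("I-ASP" :: rest) = gSpans (i + 1) (some j) rest from by
        simp [gSpans]]
      rw [ih (i + 1) j, h1, List.drop_succ_cons,
        show i + 1 + leadI rest = i + (leadI rest + 1) from by omega]
      congr 2
      push_cast; ring
    · have h0 : leadI (l :: rest) = 0 := by simp [leadI, hI]
      rw [h0]
      simp only [Nat.add_zero, List.drop_zero, Nat.cast_zero, Int.add_zero]
      by_cases hB : l = "B-ASP" <;> simp [gSpans, hI, hB]

theorem gSpans_skipI (rest : List String) : ∀ (i : Nat),
    gSpans i none rest = gSpans (i + leadI rest) none (rest.drop (leadI rest)) := by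
  induction rest with
  | nil => intro i; simp [gSpans, leadI]
  | cons l rest ih =>
    intro i
    by_cases hI : l = "I-ASP"
    · subst hI
      have h1 : leadI ("I-ASP" :: rest) = leadI rest + 1 := by simp [leadI]
      rw [show gSpans i none ("I-ASP" :: rest) = gSpans (i + 1) none rest from by simp [gSpans]]
      rw [ih (i + 1), h1, List.drop_succ_cons,
        show i + 1 + leadI rest = i + (leadI rest + 1) from by omega]
    · have h0 : leadI (l :: rest) = 0 := by simp [leadI, hI]
      simp [h0]

theorem lemB (full : List String) : ∀ (n k : Nat) (acc : List (Int × Int)),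
    full.length - k = n →
    (∀ p ∈ acc, p.1 < ((k : Int))) →
    (((List.range' k n).filter (fun j => full.getD j "" == "B-ASP")).foldl
       (fun (s : PySem.Set (Int × Int)) (j : Nat) =>
          PySem.Set.add s (((j : Int)), ((pvExpand full j : Int)))) acc)
      = acc ++ gSpans k none (full.drop k) := by
  intro n
  induction n with
  | zero =>
    intro k acc hn hacc
    have hdrop : full.drop k = [] := List.drop_eq_nil_of_le (by omega)
    simp [hdrop, gSpans]
  | succ n ih =>
    intro k acc hn hacc
    have hk : k < full.length := by omega
    rw [List.range'_succ, List.filter_cons]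
    have hget : full.getD k "" = full[k] := List.getD_eq_getElem full "" hk
    have hdrop : full.drop k = full[k] :: full.drop (k + 1) := List.drop_eq_getElem_cons hk
    by_cases hB : full[k] = "B-ASP"
    · have hcond : (full.getD k "" == "B-ASP") = true := by rw [hget, hB]; simp
      rw [hcond]
      simp only [if_pos]
      rw [List.foldl_cons]
      have hne : (((k : Int)), ((pvExpand full k : Int))) ∉ acc := by
        intro hmem; have := hacc _ hmem; simp at this
      rw [PySem.Set.add_of_not_mem hne]
      have hacc' : ∀ p ∈ acc ++ [(((k : Int)), ((pvExpand full k : Int)))],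
          p.1 < (((k + 1 : Nat)) : Int) := by
        intro p hp
        rcases List.mem_append.1 hp with h | h
        · have := hacc p h; push_cast; omega
        · simp at h; rw [h]; push_cast; omega
      rw [ih (k + 1) _ (by omega) hacc']
      rw [hdrop]
      rw [show gSpans k none (full[k] :: full.drop (k + 1))
            = gSpans (k + 1) (some k) (full.drop (k + 1)) by
        simp [gSpans, hB]]
      rw [gSpans_some, gSpans_skipI (full.drop (k + 1)) (k + 1)]
      rw [expand_eq full k]
      have harith : ((k + leadI (full.drop (k + 1)) : Nat) : Int)
          = (((k + 1 : Nat)) : Int) - 1 + ((leadI (full.drop (k + 1)) : Nat) : Int) := by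
        push_cast; ring
      rw [List.append_assoc, List.singleton_append, harith]
    · have hcond : (full.getD k "" == "B-ASP") = false := by
        rw [hget]; simp [hB]
      rw [hcond]
      simp only [if_neg, Bool.false_eq_true, not_false_iff]
      rw [ih (k + 1) acc (by omega) (by intro p hp; have := hacc p hp; push_cast; omega)]
      rw [hdrop]
      congr 1
      by_cases hI : full[k] = "I-ASP" <;> simp [gSpans, hI, hB]

theorem B_eq_gSpans (labels : List String) :
    extract_gold_phrases_alt labels = gSpans 0 none labels := by
  have := lemB labels labels.length 0 [] (by omega) (by simp)
  simpa [extract_gold_phrases_alt, PySem.Set.empty, List.range_eq_range'] using this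

-- ===== VERDICT (by name: the statement is the Claim_ definition above) =====
theorem extract_gold_phrases_spec : Claim_equal_extract_gold_phrases := by
  intro labels _
  unfold Spec_extract_gold_phrases
  rw [A_eq_gSpans, B_eq_gSpans]
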